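-- pv_equiv track=rewrite | github.com/VerenichTatiana2101/HomeWorkPython | functions.py | counting_couples
-- ===== SOURCE A (Python) =====
-- def counting_couples(arr):
--     count=0
--     arr2=[]
--     for i in range(len(arr)):
--         if arr[i] in arr2:
--             count+=1
--             arr2.remove(arr[i])
--         else:
--             arr2.append(arr[i])
--     return count
-- ===== SOURCE B (Python) =====
-- def counting_couples(arr):
--     counts = {}
--     for x in arr:
--         counts[x] = counts.get(x, 0) + 1
--     return sum(n // 2 for n in counts.values())
-- ===== Notes on version B (the rewrite author's own statement) =====
-- stated objective: faster
-- what changed: Instead of A's quadratic streaming pool with 'in'/'remove' membership scans, B builds a frequency dictionary in one pass and returns the sum of floor(freq/2) over the values.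
import Mathlib
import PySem

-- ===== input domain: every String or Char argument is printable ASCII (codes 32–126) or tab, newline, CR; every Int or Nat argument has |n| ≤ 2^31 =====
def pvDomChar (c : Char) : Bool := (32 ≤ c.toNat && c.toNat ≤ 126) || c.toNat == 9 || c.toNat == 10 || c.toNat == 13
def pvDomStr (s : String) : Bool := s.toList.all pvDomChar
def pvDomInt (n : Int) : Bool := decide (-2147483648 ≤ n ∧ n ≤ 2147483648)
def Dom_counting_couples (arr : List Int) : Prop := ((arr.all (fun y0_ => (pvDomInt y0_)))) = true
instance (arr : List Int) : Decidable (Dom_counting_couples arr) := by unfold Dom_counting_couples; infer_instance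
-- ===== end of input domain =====

-- B replaces A's streaming pool (a membership test and a remove per element) by a one-pass
-- frequency dictionary followed by summing n // 2 over its values.

-- ===== PORT A =====
def counting_couples (arr : List Int) : Int :=
  ((PySem.List.pyRange 0 (arr.length : Int) 1).foldl
    (fun (st : Int × List Int) i =>
      let x := PySem.List.pyGetD arr i 0
      if st.2.contains x then
        (st.1 + 1, (PySem.List.remove? st.2 x).getD st.2)   -- arr2.remove(arr[i]), guarded by the membership test
      else
        (st.1, st.2 ++ [x]))
    (0, [])).1

-- ===== PORT B =====
def counting_couples_alt (arr : List Int) : Int :=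
  let counts := arr.foldl (fun (d : PySem.Dict Int Int) x => d.insert x (d.getD x 0 + 1)) PySem.Dict.empty
  ((PySem.Dict.values counts).map (fun n => PySem.Int.floordiv n 2)).sum

-- ===== PRECONDITION & SPEC =====
def Spec_counting_couples (arr : List Int) (out : Int) : Prop := out = counting_couples_alt arr
instance (arr : List Int) (out : Int) : Decidable (Spec_counting_couples arr out) := by unfold Spec_counting_couples; infer_instance

-- ===== CLAIM (what is proved, stated in full; the proofs are below) =====
def Claim_equal_counting_couples : Prop := ∀ (arr : List Int), Dom_counting_couples arr → Spec_counting_couples arr (counting_couples arr)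

-- ===== LEMMAS AND PROOFS =====

/-- A's loop body, as a step function on the state (count, pool). -/
def pvStep (st : Int × List Int) (x : Int) : Int × List Int :=
  if st.2.contains x then
    (st.1 + 1, (PySem.List.remove? st.2 x).getD st.2)
  else
    (st.1, st.2 ++ [x])

lemma pvA_eq_foldl (arr : List Int) :
    counting_couples arr = (arr.foldl pvStep (0, [])).1 :=
  congrArg Prod.fst (PySem.List.foldl_pyRange_zero_pyGetD' arr 0 pvStep (0, []))

lemma pvB_eq (arr : List Int) :
    counting_couples_alt arr = ∑ k ∈ arr.toFinset, ((arr.count k / 2 : Nat) : Int) := by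
  show ((PySem.Dict.values (PySem.Dict.counter arr)).map (fun n => PySem.Int.floordiv n 2)).sum = _
  rw [PySem.Dict.values_eq_map_keys _ (PySem.Dict.nodup_keys_counter _) 0]
  simp only [PySem.Dict.keys_counter, PySem.Dict.getD_counter, List.map_map]
  rw [← List.sum_toFinset _ (PySem.Set.nodup_ofList arr)]
  have hfs : (PySem.Set.ofList arr).toFinset = arr.toFinset := by
    ext v; simp [PySem.Set.mem_ofList]
  rw [hfs]
  refine Finset.sum_congr rfl fun k _ => ?_
  show PySem.Int.floordiv ((arr.count k : Nat) : Int) 2 = _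
  exact_mod_cast PySem.Int.floordiv_natCast (arr.count k) 2

/-- Invariant of A's loop: the count is Σ ⌊freq/2⌋ over the processed prefix, and the pool
    holds exactly the values seen an odd number of times (without duplicates). -/
lemma pvA_inv (l : List Int) :
    (l.foldl pvStep (0, ([] : List Int))).1
        = ∑ k ∈ l.toFinset, ((l.count k / 2 : Nat) : Int)
      ∧ (l.foldl pvStep (0, ([] : List Int))).2.Nodup
      ∧ ∀ v, v ∈ (l.foldl pvStep (0, ([] : List Int))).2 ↔ Odd (l.count v) := by
  induction l using List.reverseRecOn with
  | nil => simp
  | append_singleton l x ih =>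
    obtain ⟨ihc, ihnd, ihmem⟩ := ih
    rw [List.foldl_append] at *
    simp only [List.foldl_cons, List.foldl_nil]
    set st := l.foldl pvStep (0, ([] : List Int)) with hst
    have hcx : (l ++ [x]).count x = l.count x + 1 := by simp [List.count_append]
    have hck : ∀ k, k ≠ x → (l ++ [x]).count k = l.count k := by
      intro k hk
      rw [List.count_append]
      have h0 : List.count k [x] = 0 := List.count_eq_zero_of_not_mem (by simpa using hk)
      omega
    by_cases hmem : x ∈ st.2
    · -- x in pool: its count so far is odd
      have hodd : Odd (l.count x) := (ihmem x).1 hmem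
      have h1 : l.count x % 2 = 1 := Nat.odd_iff.1 hodd
      have hcontains : st.2.contains x = true := by simpa using hmem
      have hstep : pvStep st x = (st.1 + 1, st.2.erase x) := by
        rw [pvStep, if_pos hcontains, PySem.List.remove?_eq_some_erase st.2 x hmem]
        rfl
      rw [hstep]
      have hxl : x ∈ l := by
        by_contra h
        rw [List.count_eq_zero_of_not_mem h] at h1
        omega
      have hxin : x ∈ l.toFinset := List.mem_toFinset.2 hxl
      have hfs : (l ++ [x]).toFinset = l.toFinset := by
        ext v
        simp only [List.toFinset_append, List.toFinset_cons, List.toFinset_nil,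
          Finset.mem_union, Finset.mem_insert, List.mem_toFinset]
        constructor
        · rintro (h | h | h)
          · exact h
          · exact h ▸ hxl
          · exact absurd h (by simp)
        · exact Or.inl
      refine ⟨?_, ihnd.erase x, ?_⟩
      · rw [hfs, ihc, ← Finset.add_sum_erase _ _ hxin,
          ← Finset.add_sum_erase _ (fun k => (((l ++ [x]).count k / 2 : Nat) : Int)) hxin]
        have hterm : (((l ++ [x]).count x / 2 : Nat) : Int) = ((l.count x / 2 : Nat) : Int) + 1 := by
          rw [hcx]; omega
        have herase : ∀ k ∈ l.toFinset.erase x,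
            (((l ++ [x]).count k / 2 : Nat) : Int) = ((l.count k / 2 : Nat) : Int) := by
          intro k hk
          rw [hck k (Finset.mem_erase.1 hk).1]
        rw [Finset.sum_congr rfl herase, hterm]
        ring
      · intro v
        rw [ihnd.mem_erase_iff]
        by_cases hv : v = x
        · subst hv
          rw [hcx]
          constructor
          · rintro ⟨h, -⟩; exact absurd rfl h
          · intro h; exact absurd (Nat.odd_iff.1 h) (by omega)
        · rw [hck v hv]
          simp [hv, ihmem v]
    · -- x not in pool: its count so far is even
      have heven : ¬ Odd (l.count x) := fun h => hmem ((ihmem x).2 h)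
      have h2 : l.count x % 2 = 0 := Nat.even_iff.1 (Nat.not_odd_iff_even.1 heven)
      have hstep : pvStep st x = (st.1, st.2 ++ [x]) := by
        rw [pvStep, if_neg (by simpa using hmem)]
      rw [hstep]
      refine ⟨?_, ?_, ?_⟩
      · by_cases hxl : x ∈ l
        · have hxin : x ∈ l.toFinset := List.mem_toFinset.2 hxl
          have hfs : (l ++ [x]).toFinset = l.toFinset := by
            ext v
            simp only [List.toFinset_append, List.toFinset_cons, List.toFinset_nil,
              Finset.mem_union, Finset.mem_insert, List.mem_toFinset]
            constructor
            · rintro (h | h | h)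
              · exact h
              · exact h ▸ hxl
              · exact absurd h (by simp)
            · exact Or.inl
          rw [hfs, ihc, ← Finset.add_sum_erase _ _ hxin,
            ← Finset.add_sum_erase _ (fun k => (((l ++ [x]).count k / 2 : Nat) : Int)) hxin]
          have hterm : (((l ++ [x]).count x / 2 : Nat) : Int) = ((l.count x / 2 : Nat) : Int) := by
            rw [hcx]; omega
          have herase : ∀ k ∈ l.toFinset.erase x,
              (((l ++ [x]).count k / 2 : Nat) : Int) = ((l.count k / 2 : Nat) : Int) := by
            intro k hk
            rw [hck k (Finset.mem_erase.1 hk).1]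
          rw [Finset.sum_congr rfl herase, hterm]
        · have hc0 : l.count x = 0 := List.count_eq_zero_of_not_mem hxl
          have hxin : x ∉ l.toFinset := fun h => hxl (List.mem_toFinset.1 h)
          have hfs : (l ++ [x]).toFinset = insert x l.toFinset := by
            ext v
            simp only [List.toFinset_append, List.toFinset_cons, List.toFinset_nil,
              Finset.mem_union, Finset.mem_insert, List.mem_toFinset]
            tauto
          rw [hfs, ihc, Finset.sum_insert hxin]
          have hterm : (((l ++ [x]).count x / 2 : Nat) : Int) = 0 := by
            rw [hcx, hc0]; norm_num
          have herase : ∀ k ∈ l.toFinset,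
              (((l ++ [x]).count k / 2 : Nat) : Int) = ((l.count k / 2 : Nat) : Int) := by
            intro k hk
            rw [hck k (by rintro rfl; exact hxin hk)]
          rw [Finset.sum_congr rfl herase, hterm]
          ring
      · rw [List.nodup_append]
        refine ⟨ihnd, List.nodup_singleton x, fun a ha b hb => ?_⟩
        rw [List.mem_singleton] at hb
        subst hb
        exact fun h => hmem (h ▸ ha)
      · intro v
        simp only [List.mem_append, List.mem_singleton]
        by_cases hv : v = x
        · subst hv
          rw [hcx]
          constructor
          · intro _
            rw [Nat.odd_iff]; omega
          · intro _
            exact Or.inr rfl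
        · rw [hck v hv]
          simp [hv, ihmem v]

-- ===== VERDICT (by name: the statement is the Claim_ definition above) =====
theorem counting_couples_spec : Claim_equal_counting_couples := by
  intro arr _
  unfold Spec_counting_couples
  rw [pvA_eq_foldl, (pvA_inv arr).1, pvB_eq]
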